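-- pv_equiv track=rewrite | github.com/rcarmo/proxmox-zpool-monitoring | monitor.py | parse_smartctl_value
-- ===== SOURCE A (Python) =====
-- def parse_smartctl_value(output, attribute_name):
--     """
--     Parses a specific SMART attribute value from smartctl output.
--     Handles both SATA (-A) and NVMe (-l nvme-smart-log or -A) formats.
--     """
--     # Try SATA format first (value in 10th column)
--     for line in output.splitlines():
--         parts = line.split()
--         # Check if the line looks like a SATA attribute line and matches the name
--         if len(parts) >= 10 and parts[1] == attribute_name:
--             return parts[9] # SATA RAW_VALUE
--
--     # Try NVMe format (Key: Value)
--     # Make the search case-insensitive and strip trailing spaces from the key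
--     search_key = attribute_name.strip().lower()
--     for line in output.splitlines():
--         if ':' in line:
--             key, value = line.split(':', 1)
--             key = key.strip().lower()
--             if key == search_key:
--                 # Return the full, stripped value string for NVMe attributes
--                 return value.strip()
--     return None
-- ===== SOURCE B (Python) =====
-- def _nvme_match(line, search_key):
--     if ':' in line:
--         key, value = line.split(':', 1)
--         if key.strip().lower() == search_key:
--             return value.strip()
--     return None
--
-- def parse_smartctl_value(output, attribute_name):
--     # single pass: SATA match returns immediately; first NVMe match is remembered
--     search_key = attribute_name.strip().lower()
--     candidate = None
--     for line in output.splitlines():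
--         parts = line.split()
--         if len(parts) >= 10 and parts[1] == attribute_name:
--             return parts[9]
--         if candidate is None:
--             candidate = _nvme_match(line, search_key)
--     return candidate
-- ===== Notes on version B (the rewrite author's own statement) =====
-- stated objective: alternative
-- what changed: B replaces A's two sequential scans of the lines (all-SATA first, then all-NVMe) by a single pass that returns the first SATA match immediately and remembers the first NVMe match as a fallback returned after the loop.
import Mathlib
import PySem

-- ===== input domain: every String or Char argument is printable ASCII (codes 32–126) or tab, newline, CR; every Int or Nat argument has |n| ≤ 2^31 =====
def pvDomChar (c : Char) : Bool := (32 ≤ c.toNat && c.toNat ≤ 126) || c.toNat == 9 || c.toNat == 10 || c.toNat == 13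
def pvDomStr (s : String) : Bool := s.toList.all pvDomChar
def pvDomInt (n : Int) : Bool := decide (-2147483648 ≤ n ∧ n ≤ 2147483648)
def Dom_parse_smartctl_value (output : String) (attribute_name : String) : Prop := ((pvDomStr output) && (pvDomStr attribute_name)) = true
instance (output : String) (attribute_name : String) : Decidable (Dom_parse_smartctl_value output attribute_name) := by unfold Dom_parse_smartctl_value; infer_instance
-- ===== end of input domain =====

-- ===== PORT A =====
-- Header: B does one pass over the lines (SATA match returns at once, first NVMe match is
-- remembered), instead of A's two sequential scans; objective: simpler/alternative.
def pvA_sata (attr : String) : List String → Option String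
  | [] => none
  | line :: rest =>
    let parts := PySem.Str.split₀ line
    if 10 ≤ parts.length ∧ parts.getD 1 "" = attr then some (parts.getD 9 "")
    else pvA_sata attr rest

def pvA_nvme (sk : String) : List String → Option String
  | [] => none
  | line :: rest =>
    if PySem.Str.isIn ":" line then
      match PySem.Str.splitMax? line ":" 1 with
      | some (k :: v :: _) =>
          if PySem.Str.lower (PySem.Str.strip k) = sk then some (PySem.Str.strip v)
          else pvA_nvme sk rest
      | _ => pvA_nvme sk rest
    else pvA_nvme sk rest

def parse_smartctl_value (output : String) (attribute_name : String) : Option String :=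
  match pvA_sata attribute_name (PySem.Str.splitlines output) with
  | some v => some v
  | none =>
      let search_key := PySem.Str.lower (PySem.Str.strip attribute_name)
      pvA_nvme search_key (PySem.Str.splitlines output)

-- ===== PORT B =====
def pvB_nvmeMatch (line : String) (sk : String) : Option String :=
  if PySem.Str.isIn ":" line then
    match PySem.Str.splitMax? line ":" 1 with
    | some (k :: v :: _) =>
        if PySem.Str.lower (PySem.Str.strip k) = sk then some (PySem.Str.strip v)
        else none
    | _ => none
  else none

def pvB_loop (attr sk : String) (cand : Option String) : List String → Option String
  | [] => cand
  | line :: rest =>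
    let parts := PySem.Str.split₀ line
    if 10 ≤ parts.length ∧ parts.getD 1 "" = attr then some (parts.getD 9 "")
    else
      let cand' := if cand.isNone then pvB_nvmeMatch line sk else cand
      pvB_loop attr sk cand' rest

def parse_smartctl_value_alt (output : String) (attribute_name : String) : Option String :=
  let search_key := PySem.Str.lower (PySem.Str.strip attribute_name)
  pvB_loop attribute_name search_key none (PySem.Str.splitlines output)

-- ===== PRECONDITION & SPEC =====
def Spec_parse_smartctl_value (output : String) (attribute_name : String) (out : Option String) : Prop := out = parse_smartctl_value_alt output attribute_name
instance (output : String) (attribute_name : String) (out : Option String) : Decidable (Spec_parse_smartctl_value output attribute_name out) := by unfold Spec_parse_smartctl_value; infer_instance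

-- ===== CLAIM (what is proved, stated in full; the proofs are below) =====
def Claim_equal_parse_smartctl_value : Prop := ∀ (output : String) (attribute_name : String), Dom_parse_smartctl_value output attribute_name → Spec_parse_smartctl_value output attribute_name (parse_smartctl_value output attribute_name)

-- ===== LEMMAS AND PROOFS =====
lemma pvA_nvme_cons (sk line : String) (rest : List String) :
    pvA_nvme sk (line :: rest) = (pvB_nvmeMatch line sk).or (pvA_nvme sk rest) := by
  simp only [pvA_nvme, pvB_nvmeMatch]
  split
  · split
    · split <;> simp
    · simp
  · simp

lemma pvB_loop_eq (attr sk : String) (lines : List String) (cand : Option String) :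
    pvB_loop attr sk cand lines =
      match pvA_sata attr lines with
      | some v => some v
      | none => cand.or (pvA_nvme sk lines) := by
  induction lines generalizing cand with
  | nil => cases cand <;> rfl
  | cons line rest ih =>
    by_cases hc : 10 ≤ (PySem.Str.split₀ line).length ∧ (PySem.Str.split₀ line).getD 1 "" = attr
    · simp only [pvB_loop, pvA_sata, if_pos hc]
    · simp only [pvB_loop, pvA_sata, if_neg hc]
      have hstep : (if cand.isNone = true then pvB_nvmeMatch line sk else cand)
          = cand.or (pvB_nvmeMatch line sk) := by cases cand <;> rfl
      rw [hstep, ih]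
      cases pvA_sata attr rest with
      | some v => rfl
      | none => simp only [pvA_nvme_cons, Option.or_assoc]

-- ===== VERDICT (by name: the statement is the Claim_ definition above) =====
theorem parse_smartctl_value_spec : Claim_equal_parse_smartctl_value := by
  intro output attribute_name _
  unfold Spec_parse_smartctl_value parse_smartctl_value parse_smartctl_value_alt
  rw [pvB_loop_eq]
  cases pvA_sata attribute_name (PySem.Str.splitlines output) <;> simp [Option.or]
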